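-- pv_equiv track=rewrite | github.com/alicecse/Programmation_et_structures_de_donnees | td6/td6_v.py | get_all_reidemeister_pairs
-- ===== SOURCE A (Python) =====
-- def get_all_reidemeister_pairs(croisements):
--     # Renvoie toutes les paires (i,j) valides pour noeuds de reidemeister
--     paires = []
--     for i in range(len(croisements)):
--         for j in range(i + 1, len(croisements)):
--             if croisements[i] == croisements[j]:
--                 fils_concernes = [croisements[i], croisements[i] + 1]
--                 entre = croisements[i + 1:j]
--                 if all(c not in fils_concernes and c != croisements[i] - 1 and c != croisements[i] + 1 for c in entre):
--                     paires.append((i, j))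
--     return paires
-- ===== SOURCE B (Python) =====
-- def get_all_reidemeister_pairs(croisements):
--     # One right-to-left pass: nxt[w] = nearest index to the right holding w.
--     # (i, j) is a valid pair iff the nearest index to the right of i holding a
--     # value in {v-1, v, v+1} (v = croisements[i]) holds exactly v; j is that index.
--     nxt = {}
--     pairs = []
--     for i in range(len(croisements) - 1, -1, -1):
--         v = croisements[i]
--         j = nxt.get(v)
--         if j is not None:
--             a = nxt.get(v - 1)
--             b = nxt.get(v + 1)
--             if (a is None or j < a) and (b is None or j < b):
--                 pairs.append((i, j))
--         nxt[v] = i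
--     pairs.reverse()
--     return pairs
-- ===== Notes on version B (the rewrite author's own statement) =====
-- stated objective: faster
-- what changed: Replaced A's scan of all index pairs with a per-pair slice check by a single right-to-left pass that keeps, for each value, the nearest index to its right: (i,j) is emitted iff the nearest later index holding a value in {v-1,v,v+1} holds exactly v.
import Mathlib
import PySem

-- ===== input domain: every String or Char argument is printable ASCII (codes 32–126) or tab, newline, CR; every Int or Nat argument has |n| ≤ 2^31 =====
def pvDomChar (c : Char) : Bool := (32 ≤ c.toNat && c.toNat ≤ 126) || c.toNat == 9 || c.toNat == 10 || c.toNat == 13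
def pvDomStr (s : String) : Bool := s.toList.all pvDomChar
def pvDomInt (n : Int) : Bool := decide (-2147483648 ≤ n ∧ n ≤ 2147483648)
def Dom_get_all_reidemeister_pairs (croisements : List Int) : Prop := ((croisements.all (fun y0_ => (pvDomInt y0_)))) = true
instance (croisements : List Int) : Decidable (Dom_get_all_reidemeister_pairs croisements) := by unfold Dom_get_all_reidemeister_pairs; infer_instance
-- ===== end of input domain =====

-- B replaces A's cubic scan of all index pairs with one right-to-left pass keeping,
-- for each value, the nearest index to its right (objective: faster, asymptotic).

-- ===== PORT A =====
def get_all_reidemeister_pairs (croisements : List Int) : List (Int × Int) :=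
  (PySem.List.pyRange 0 (croisements.length : Int) 1).foldl (fun paires i =>
    (PySem.List.pyRange (i + 1) (croisements.length : Int) 1).foldl (fun paires j =>
      if PySem.List.pyGetD croisements i 0 = PySem.List.pyGetD croisements j 0 then
        let fils_concernes := [PySem.List.pyGetD croisements i 0,
                               PySem.List.pyGetD croisements i 0 + 1]
        let entre := PySem.List.slice croisements (some (i + 1)) (some j)
        if entre.all (fun c =>
            !(fils_concernes.contains c)
            && !(c == PySem.List.pyGetD croisements i 0 - 1)
            && !(c == PySem.List.pyGetD croisements i 0 + 1)) then
          paires ++ [(i, j)]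
        else paires
      else paires) paires) []

-- ===== PORT B =====
-- loop body of B's single right-to-left pass (nxt maps a value to the nearest index to its right)
def bStep (croisements : List Int) (st : PySem.Dict Int Int × List (Int × Int)) (i : Int) :
    PySem.Dict Int Int × List (Int × Int) :=
  let v := PySem.List.pyGetD croisements i 0
  let st2 :=
    match st.1.get? v with
    | some j =>
      let a := st.1.get? (v - 1)
      let b := st.1.get? (v + 1)
      if (a.all fun x => decide (j < x)) && (b.all fun x => decide (j < x)) then
        (st.1, st.2 ++ [(i, j)])
      else st
    | none => st
  (st2.1.insert v i, st2.2)

def get_all_reidemeister_pairs_alt (croisements : List Int) : List (Int × Int) :=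
  ((PySem.List.pyRange ((croisements.length : Int) - 1) (-1) (-1)).foldl
    (bStep croisements) (PySem.Dict.empty, [])).2.reverse

-- ===== PRECONDITION & SPEC =====
def Spec_get_all_reidemeister_pairs (croisements : List Int) (out : List (Int × Int)) : Prop := out = get_all_reidemeister_pairs_alt croisements
instance (croisements : List Int) (out : List (Int × Int)) : Decidable (Spec_get_all_reidemeister_pairs croisements out) := by unfold Spec_get_all_reidemeister_pairs; infer_instance

-- ===== CLAIM (what is proved, stated in full; the proofs are below) =====
def Claim_equal_get_all_reidemeister_pairs : Prop := ∀ (croisements : List Int), Dom_get_all_reidemeister_pairs croisements → Spec_get_all_reidemeister_pairs croisements (get_all_reidemeister_pairs croisements)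

-- ===== LEMMAS AND PROOFS =====

-- first index u ≥ s with l[u] = w, none if there is none
def nextFrom (l : List Int) (s : Nat) (w : Int) : Option Nat :=
  if h : s < l.length then
    if l.getD s 0 = w then some s else nextFrom l (s + 1) w
  else none
termination_by l.length - s

theorem nextFrom_eq (l : List Int) (s : Nat) (w : Int) :
    nextFrom l s w =
      if s < l.length then
        (if l.getD s 0 = w then some s else nextFrom l (s + 1) w)
      else none := by
  rw [nextFrom]; split <;> simp

theorem nf_some (l : List Int) (w : Int) :
    ∀ fuel s j, l.length - s ≤ fuel → nextFrom l s w = some j →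
      s ≤ j ∧ j < l.length ∧ l.getD j 0 = w ∧ ∀ t, s ≤ t → t < j → l.getD t 0 ≠ w := by
  intro fuel
  induction fuel with
  | zero =>
    intro s j h he
    rw [nextFrom_eq, if_neg (by omega : ¬ s < l.length)] at he
    cases he
  | succ m ih =>
    intro s j h he
    rw [nextFrom_eq] at he
    by_cases hs : s < l.length
    · rw [if_pos hs] at he
      split at he
      · rename_i hv
        cases he
        exact ⟨le_refl _, hs, hv, fun t h1 h2 => absurd h1 (by omega)⟩
      · rename_i hv
        obtain ⟨h1, h2, h3, h4⟩ := ih (s + 1) j (by omega) he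
        refine ⟨by omega, h2, h3, fun t ht1 ht2 => ?_⟩
        rcases Nat.eq_or_lt_of_le ht1 with rfl | hlt
        · exact hv
        · exact h4 t hlt ht2
    · rw [if_neg hs] at he
      cases he

theorem nf_none (l : List Int) (w : Int) :
    ∀ fuel s, l.length - s ≤ fuel → nextFrom l s w = none →
      ∀ t, s ≤ t → t < l.length → l.getD t 0 ≠ w := by
  intro fuel
  induction fuel with
  | zero => intro s h he t h1 h2; omega
  | succ m ih =>
    intro s h he t h1 h2
    have hs : s < l.length := by omega
    rw [nextFrom_eq, if_pos hs] at he
    split at he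
    · cases he
    · rename_i hv
      rcases Nat.eq_or_lt_of_le h1 with rfl | hlt
      · exact hv
      · exact ih (s + 1) (by omega) he t hlt h2

theorem nf_of (l : List Int) (w : Int) (s j : Nat) (hj : s ≤ j) (hjn : j < l.length)
    (hw : l.getD j 0 = w) (hmin : ∀ t, s ≤ t → t < j → l.getD t 0 ≠ w) :
    nextFrom l s w = some j := by
  rcases he : nextFrom l s w with _ | j'
  · exact absurd hw (nf_none l w (l.length - s) s (le_refl _) he j hj hjn)
  · obtain ⟨h1, h2, h3, h4⟩ := nf_some l w (l.length - s) s j' (le_refl _) he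
    congr 1
    by_contra hne
    rcases Nat.lt_or_ge j' j with hlt | hge
    · exact hmin j' h1 hlt h3
    · exact h4 j hj (by omega) hw

-- the unique partner of position k, if any: the nearest later position holding a value
-- in {v-1, v, v+1} (v = l[k]), provided it holds exactly v
def goodJ (l : List Int) (k : Nat) : Option Nat :=
  match nextFrom l (k + 1) (l.getD k 0) with
  | some j =>
    if (nextFrom l (k + 1) (l.getD k 0 - 1)).all (fun a => decide (j < a))
       && (nextFrom l (k + 1) (l.getD k 0 + 1)).all (fun a => decide (j < a))
    then some j else none
  | none => none

def outAt (l : List Int) (k : Nat) : List (Int × Int) :=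
  match goodJ l k with
  | some m => [((k : Int), (m : Int))]
  | none => []

-- A's inner test as a boolean predicate on the second index
def condb (l : List Int) (i j : Int) : Bool :=
  (PySem.List.pyGetD l i 0 == PySem.List.pyGetD l j 0) &&
  ((PySem.List.slice l (some (i + 1)) (some j)).all (fun c =>
      !([PySem.List.pyGetD l i 0, PySem.List.pyGetD l i 0 + 1].contains c)
      && !(c == PySem.List.pyGetD l i 0 - 1)
      && !(c == PySem.List.pyGetD l i 0 + 1)))

theorem mem_drop_take (l : List Int) (s t : Nat) (c : Int) :
    c ∈ (l.drop s).take t ↔ ∃ u, s ≤ u ∧ u < s + t ∧ u < l.length ∧ l.getD u 0 = c := by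
  rw [List.mem_iff_getElem]
  constructor
  · rintro ⟨idx, hidx, he⟩
    have hlen : idx < min t (l.length - s) := by simpa using hidx
    refine ⟨s + idx, by omega, by omega, by omega, ?_⟩
    rw [List.getD_eq_getElem l 0 (by omega)]
    rw [List.getElem_take, List.getElem_drop] at he
    exact he
  · rintro ⟨u, h1, h2, h3, h4⟩
    refine ⟨u - s, by simp; omega, ?_⟩
    rw [List.getD_eq_getElem l 0 h3] at h4
    simp only [List.getElem_take, List.getElem_drop, show s + (u - s) = u by omega]
    exact h4

theorem cond_iff (l : List Int) (k m : Nat) (_hk : k < l.length) (hm : k < m)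
    (hmn : m < l.length) :
    condb l (k : Int) (m : Int) = true ↔ goodJ l k = some m := by
  have hcast : ((k : Int) + 1) = ((k + 1 : Nat) : Int) := by push_cast; ring
  have hslice : PySem.List.slice l (some ((k : Int) + 1)) (some (m : Int))
      = (l.drop (k + 1)).take (m - (k + 1)) := by
    rw [hcast, PySem.List.slice_natCast]
  have hstep1 : condb l (k : Int) (m : Int) = true ↔
      (l.getD m 0 = l.getD k 0 ∧ ∀ u, k + 1 ≤ u → u < m →
        l.getD u 0 ≠ l.getD k 0 - 1 ∧ l.getD u 0 ≠ l.getD k 0 ∧ l.getD u 0 ≠ l.getD k 0 + 1) := by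
    simp only [condb, hslice, PySem.List.pyGetD_natCast, Bool.and_eq_true, beq_iff_eq,
      List.all_eq_true, Bool.not_eq_true', beq_eq_false_iff_ne, List.contains_eq_mem,
      List.mem_cons, List.not_mem_nil, or_false, decide_eq_false_iff_not]
    constructor
    · rintro ⟨h1, h2⟩
      refine ⟨h1.symm, fun u hu1 hu2 => ?_⟩
      have hmem : l.getD u 0 ∈ (l.drop (k + 1)).take (m - (k + 1)) :=
        (mem_drop_take l (k + 1) (m - (k + 1)) _).mpr ⟨u, hu1, by omega, by omega, rfl⟩
      have h3 := h2 _ hmem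
      tauto
    · rintro ⟨h1, h2⟩
      refine ⟨h1.symm, fun c hc => ?_⟩
      obtain ⟨u, hu1, hu2, hu3, rfl⟩ := (mem_drop_take l (k + 1) (m - (k + 1)) c).mp hc
      have h3 := h2 u hu1 (by omega)
      tauto
  rw [hstep1]
  constructor
  · rintro ⟨hmv, hcl⟩
    have h1 : nextFrom l (k + 1) (l.getD k 0) = some m :=
      nf_of l _ (k + 1) m (by omega) hmn hmv (fun t ht1 ht2 => (hcl t ht1 ht2).2.1)
    have h2 : (nextFrom l (k + 1) (l.getD k 0 - 1)).all (fun a => decide (m < a)) = true := by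
      rcases he : nextFrom l (k + 1) (l.getD k 0 - 1) with _ | a
      · rfl
      · obtain ⟨ha1, ha2, ha3, _⟩ := nf_some l _ (l.length - (k + 1)) (k + 1) a (le_refl _) he
        simp only [Option.all_some, decide_eq_true_eq]
        by_contra hle
        have ham : a ≠ m := fun h => by rw [h, hmv] at ha3; omega
        exact (hcl a ha1 (by omega)).1 ha3
    have h3 : (nextFrom l (k + 1) (l.getD k 0 + 1)).all (fun a => decide (m < a)) = true := by
      rcases he : nextFrom l (k + 1) (l.getD k 0 + 1) with _ | a
      · rfl
      · obtain ⟨ha1, ha2, ha3, _⟩ := nf_some l _ (l.length - (k + 1)) (k + 1) a (le_refl _) he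
        simp only [Option.all_some, decide_eq_true_eq]
        by_contra hle
        have ham : a ≠ m := fun h => by rw [h, hmv] at ha3; omega
        exact (hcl a ha1 (by omega)).2.2 ha3
    unfold goodJ
    simp only [h1]
    rw [h2, h3]
    simp
  · intro hg
    unfold goodJ at hg
    split at hg
    · rename_i j he1
      split at hg
      · rename_i hcnd
        cases hg
        obtain ⟨hj1, hj2, hj3, hj4⟩ := nf_some l _ (l.length - (k + 1)) (k + 1) m (le_refl _) he1
        refine ⟨hj3, fun u hu1 hu2 => ?_⟩
        refine ⟨?_, hj4 u hu1 hu2, ?_⟩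
        · intro hu
          have hex : ∃ a, nextFrom l (k + 1) (l.getD k 0 - 1) = some a ∧ a ≤ u := by
            rcases he2 : nextFrom l (k + 1) (l.getD k 0 - 1) with _ | a
            · exact absurd hu (nf_none l _ (l.length - (k + 1)) (k + 1) (le_refl _) he2 u hu1 (by omega))
            · obtain ⟨hb1, hb2, hb3, hb4⟩ := nf_some l _ (l.length - (k + 1)) (k + 1) a (le_refl _) he2
              refine ⟨a, rfl, ?_⟩
              by_contra hgt
              exact hb4 u hu1 (by omega) hu
          obtain ⟨a, ha, hau⟩ := hex
          have hh := hcnd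
          rw [Bool.and_eq_true] at hh
          have hh1 := hh.1
          rw [ha] at hh1
          simp only [Option.all_some, decide_eq_true_eq] at hh1
          omega
        · intro hu
          have hex : ∃ a, nextFrom l (k + 1) (l.getD k 0 + 1) = some a ∧ a ≤ u := by
            rcases he2 : nextFrom l (k + 1) (l.getD k 0 + 1) with _ | a
            · exact absurd hu (nf_none l _ (l.length - (k + 1)) (k + 1) (le_refl _) he2 u hu1 (by omega))
            · obtain ⟨hb1, hb2, hb3, hb4⟩ := nf_some l _ (l.length - (k + 1)) (k + 1) a (le_refl _) he2
              refine ⟨a, rfl, ?_⟩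
              by_contra hgt
              exact hb4 u hu1 (by omega) hu
          obtain ⟨a, ha, hau⟩ := hex
          have hh := hcnd
          rw [Bool.and_eq_true] at hh
          have hh2 := hh.2
          rw [ha] at hh2
          simp only [Option.all_some, decide_eq_true_eq] at hh2
          omega
      · cases hg
    · cases hg

theorem goodJ_bounds (l : List Int) (k m : Nat) (h : goodJ l k = some m) :
    k + 1 ≤ m ∧ m < l.length := by
  unfold goodJ at h
  split at h
  · rename_i j he
    split at h
    · cases h
      obtain ⟨h1, h2, _, _⟩ := nf_some l _ (l.length - (k + 1)) (k + 1) m (le_refl _) he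
      exact ⟨h1, h2⟩
    · cases h
  · cases h

theorem filter_eq_singleton {α : Type} [DecidableEq α] :
    ∀ (l : List α) (p : α → Bool) (a : α), l.Nodup → a ∈ l →
      (∀ x ∈ l, p x = decide (x = a)) → l.filter p = [a] := by
  intro l
  induction l with
  | nil => intro p a _ ha _; cases ha
  | cons b t ih =>
    intro p a hnd ha hp
    have hbt : b ∉ t := (List.nodup_cons.mp hnd).1
    rcases List.mem_cons.mp ha with hab | hat
    · subst hab
      have hpb : p a = true := by rw [hp a (by simp)]; simp
      rw [List.filter_cons_of_pos hpb]
      have ht : t.filter p = [] := List.filter_eq_nil_iff.mpr (fun x hx => by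
        rw [hp x (by simp [hx])]
        simp only [decide_eq_true_eq]
        intro he; rw [he] at hx; exact hbt hx)
      rw [ht]
    · have hab : b ≠ a := fun h => hbt (h ▸ hat)
      have hpb : p b = false := by rw [hp b (by simp)]; simp [hab]
      rw [List.filter_cons_of_neg (by simp [hpb])]
      exact ih p a (List.nodup_cons.mp hnd).2 hat (fun x hx => hp x (by simp [hx]))

theorem filter_char (l : List Int) (k : Nat) (hk : k < l.length) :
    (PySem.List.pyRange ((k : Int) + 1) (l.length : Int) 1).filter (condb l (k : Int))
      = (goodJ l k).elim [] (fun m => [(m : Int)]) := by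
  rcases hg : goodJ l k with _ | m
  · simp only [Option.elim]
    apply List.filter_eq_nil_iff.mpr
    intro j hj
    obtain ⟨hj1, hj2⟩ := PySem.List.mem_pyRange_one.mp hj
    obtain ⟨m', rfl⟩ : ∃ m' : Nat, ((m' : Int)) = j := ⟨j.toNat, by omega⟩
    intro hc
    have hcc := (cond_iff l k m' hk (by omega) (by omega)).mp hc
    rw [hg] at hcc
    cases hcc
  · obtain ⟨hm1, hm2⟩ := goodJ_bounds l k m hg
    simp only [Option.elim]
    apply filter_eq_singleton _ _ _ (PySem.List.nodup_pyRange_one _ _)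
    · exact PySem.List.mem_pyRange_one.mpr ⟨by omega, by omega⟩
    · intro x hx
      obtain ⟨hx1, hx2⟩ := PySem.List.mem_pyRange_one.mp hx
      obtain ⟨m', rfl⟩ : ∃ m' : Nat, ((m' : Int)) = x := ⟨x.toNat, by omega⟩
      have hiff : condb l (k : Int) (m' : Int) = true ↔ m' = m := by
        rw [cond_iff l k m' hk (by omega) (by omega), hg]
        constructor
        · intro h; exact (Option.some_inj.mp h).symm
        · rintro rfl; rfl
      calc condb l (k : Int) (m' : Int)
          = decide (condb l (k : Int) (m' : Int) = true) := by simp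
        _ = decide (((m' : Nat) : Int) = ((m : Nat) : Int)) := by
            simp only [decide_eq_decide]
            rw [hiff, Int.natCast_inj]

theorem flatMap_map' {α β γ : Type} (f : α → β) (g : β → List γ) :
    ∀ l : List α, (l.map f).flatMap g = l.flatMap (fun x => g (f x)) := by
  intro l; induction l with
  | nil => rfl
  | cons a t ih => simp [ih]

theorem flatMap_congr' {α β : Type} : ∀ (l : List α) (f g : α → List β),
    (∀ x ∈ l, f x = g x) → l.flatMap f = l.flatMap g := by
  intro l
  induction l with
  | nil => intro f g _; rfl
  | cons a t ih =>
    intro f g h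
    simp only [List.flatMap_cons]
    rw [h a (by simp), ih f g (fun x hx => h x (by simp [hx]))]

theorem inner_body_eq (l : List Int) (i : Int) :
    (fun (paires : List (Int × Int)) (j : Int) =>
      if PySem.List.pyGetD l i 0 = PySem.List.pyGetD l j 0 then
        let fils_concernes := [PySem.List.pyGetD l i 0, PySem.List.pyGetD l i 0 + 1]
        let entre := PySem.List.slice l (some (i + 1)) (some j)
        if entre.all (fun c =>
            !(fils_concernes.contains c)
            && !(c == PySem.List.pyGetD l i 0 - 1)
            && !(c == PySem.List.pyGetD l i 0 + 1)) then
          paires ++ [(i, j)]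
        else paires
      else paires)
    = (fun paires j => if condb l i j then paires ++ [(i, j)] else paires) := by
  funext paires j
  by_cases h1 : PySem.List.pyGetD l i 0 = PySem.List.pyGetD l j 0 <;> simp [condb, h1]

theorem A_eq_flatMap (l : List Int) :
    get_all_reidemeister_pairs l = (List.range l.length).flatMap (outAt l) := by
  unfold get_all_reidemeister_pairs
  refine Eq.trans (PySem.List.foldl_congr_mem _ _ (fun paires i =>
      paires ++ ((PySem.List.pyRange (i + 1) (l.length : Int) 1).filter (condb l i)).map
        (fun j => (i, j))) _
      (fun acc i _ => by
        beta_reduce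
        rw [inner_body_eq l i]
        exact PySem.List.foldl_append_if _ _ _ _)) ?_
  rw [PySem.List.foldl_append_eq_flatMap, List.nil_append, PySem.List.pyRange_zero_natCast,
    flatMap_map']
  apply flatMap_congr'
  intro k hk
  have hkl : k < l.length := List.mem_range.mp hk
  rw [filter_char l k hkl]
  rcases hg : goodJ l k with _ | m
  · simp [outAt, hg]
  · simp [outAt, hg]

theorem B_inv (l : List Int) :
    ∀ (s : Nat), s ≤ l.length → ∀ (d : PySem.Dict Int Int) (acc : List (Int × Int)),
      (∀ w, d.get? w = (nextFrom l s w).map (fun j => (j : Int))) →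
      (((List.range s).map (fun k : Nat => (k : Int))).reverse.foldl (bStep l) (d, acc)).2
        = acc ++ ((List.range s).flatMap (outAt l)).reverse := by
  intro s
  induction s with
  | zero => intro _ d acc _; simp
  | succ s ih =>
    intro hs d acc hinv
    have hsl : s < l.length := hs
    rw [List.range_succ, List.map_append, List.reverse_append]
    simp only [List.map_cons, List.map_nil, List.reverse_cons, List.reverse_nil,
      List.nil_append, List.singleton_append]
    rw [List.foldl_cons]
    have hstep : bStep l (d, acc) ((s : Nat) : Int)
        = (d.insert (l.getD s 0) (s : Int), acc ++ outAt l s) := by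
      unfold bStep outAt goodJ
      rcases hnf1 : nextFrom l (s + 1) (l.getD s 0) with _ | j <;>
        rcases hnf2 : nextFrom l (s + 1) (l.getD s 0 - 1) with _ | a <;>
          rcases hnf3 : nextFrom l (s + 1) (l.getD s 0 + 1) with _ | b <;>
            simp only [PySem.List.pyGetD_natCast, hinv, hnf1, hnf2, hnf3] <;>
            simp [Option.all] <;> split_ifs <;> simp_all
    rw [hstep]
    have hinv' : ∀ w, (d.insert (l.getD s 0) (s : Int)).get? w
        = (nextFrom l s w).map (fun j => (j : Int)) := by
      intro w
      by_cases hw : w = l.getD s 0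
      · subst hw
        rw [PySem.Dict.get?_insert_self, nextFrom_eq]
        simp [hsl]
      · rw [PySem.Dict.get?_insert_of_ne _ _ hw, hinv w]
        conv_rhs => rw [nextFrom_eq]
        rw [if_pos hsl, if_neg (fun h => hw h.symm)]
    rw [ih (by omega) _ _ hinv']
    have hrev : (outAt l s).reverse = outAt l s := by
      unfold outAt
      rcases goodJ l s with _ | m <;> simp
    rw [List.flatMap_append, List.reverse_append]
    simp only [List.flatMap_cons, List.flatMap_nil, List.append_nil]
    rw [hrev, List.append_assoc]

theorem B_eq_flatMap (l : List Int) :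
    get_all_reidemeister_pairs_alt l = (List.range l.length).flatMap (outAt l) := by
  unfold get_all_reidemeister_pairs_alt
  rw [PySem.List.pyRange_neg_one_eq_reverse,
    show ((-1 : Int) + 1) = 0 by ring,
    show ((l.length : Int) - 1 + 1) = (l.length : Int) by ring,
    PySem.List.pyRange_zero_natCast]
  have h0 : ∀ w, (PySem.Dict.empty : PySem.Dict Int Int).get? w
      = (nextFrom l l.length w).map (fun j => (j : Int)) := by
    intro w
    rw [PySem.Dict.get?_empty, nextFrom_eq, if_neg (lt_irrefl _)]
    rfl
  rw [B_inv l l.length (le_refl _) PySem.Dict.empty [] h0]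
  simp

-- ===== VERDICT (by name: the statement is the Claim_ definition above) =====
theorem get_all_reidemeister_pairs_spec : Claim_equal_get_all_reidemeister_pairs := by
  intro l _
  unfold Spec_get_all_reidemeister_pairs
  rw [A_eq_flatMap, B_eq_flatMap]
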